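-- pv_equiv track=rewrite | github.com/eytree/trace-scope | tools/merge_header.py | deduplicate_includes
-- ===== SOURCE A (Python) =====
-- from typing import List, Set, Dict, Tuple
--
-- def deduplicate_includes(includes: List[str]) -> List[str]:
--     """Deduplicate includes and sort them"""
--     seen = set()
--     system_includes = []
--     project_includes = []
--
--     for include in includes:
--         if include not in seen:
--             seen.add(include)
--             if include.startswith('#include <'):
--                 system_includes.append(include)
--             else:
--                 project_includes.append(include)
--
--     # Sort system includes alphabetically
--     system_includes.sort()
--     project_includes.sort()
--
--     return system_includes + project_includes
-- ===== SOURCE B (Python) =====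
-- def deduplicate_includes(includes):
--     """Deduplicate includes and sort them"""
--     ordered = sorted(includes, key=lambda x: (not x.startswith('#include <'), x))
--     out = []
--     for x in ordered:
--         if not out or out[-1] != x:
--             out.append(x)
--     return out
-- ===== Notes on version B (the rewrite author's own statement) =====
-- stated objective: alternative
-- what changed: Replaces A's set-guarded single pass that partitions into two lists followed by two sorts with one sort of the whole list under the composite key (not is_system, name) followed by a linear adjacent-duplicate-removal scan; no set and no partition are used.
import Mathlib
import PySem

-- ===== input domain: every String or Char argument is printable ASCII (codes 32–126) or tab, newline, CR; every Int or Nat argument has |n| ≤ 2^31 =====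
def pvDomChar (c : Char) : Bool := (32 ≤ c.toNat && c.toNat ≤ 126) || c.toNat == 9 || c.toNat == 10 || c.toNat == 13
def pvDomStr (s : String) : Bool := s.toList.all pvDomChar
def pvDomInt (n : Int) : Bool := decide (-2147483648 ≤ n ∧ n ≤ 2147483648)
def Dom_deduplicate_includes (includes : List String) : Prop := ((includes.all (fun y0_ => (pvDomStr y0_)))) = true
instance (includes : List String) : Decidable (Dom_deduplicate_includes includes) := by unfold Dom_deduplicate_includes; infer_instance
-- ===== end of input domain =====

-- B replaces A's set-guarded dedup-and-partition pass plus two sorts by one sort of the whole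
-- list under the composite key (not is_system, name) followed by a linear adjacent-duplicate scan;
-- objective: alternative.

-- ===== PORT A =====
-- single loop: seen set + two append-lists, then sort each and concatenate
def deduplicate_includes (includes : List String) : List String :=
  let st := includes.foldl
    (fun (st : PySem.Set String × List String × List String) inc =>
      if PySem.Set.contains st.1 inc then st
      else
        let seen := PySem.Set.add st.1 inc
        if PySem.Str.startswith inc "#include <" then (seen, st.2.1 ++ [inc], st.2.2)
        else (seen, st.2.1, st.2.2 ++ [inc]))
    (PySem.Set.empty, [], [])
  PySem.List.sorted st.2.1 (fun x => x) false ++ PySem.List.sorted st.2.2 (fun x => x) false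

-- ===== PORT B =====
-- one sort under the tuple key (not startswith, x), then the adjacent-dedup loop;
-- 'out[-1]' is read via getLast? (the 'not out' guard makes the index safe in Python)
def deduplicate_includes_alt (includes : List String) : List String :=
  let ordered := PySem.List.sorted2 includes (fun x => !PySem.Str.startswith x "#include <") (fun x => x) false
  ordered.foldl (fun out x => if out.isEmpty || out.getLast? != some x then out ++ [x] else out) []

-- ===== PRECONDITION & SPEC =====
def Spec_deduplicate_includes (includes : List String) (out : List String) : Prop := out = deduplicate_includes_alt includes
instance (includes : List String) (out : List String) : Decidable (Spec_deduplicate_includes includes out) := by unfold Spec_deduplicate_includes; infer_instance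

-- ===== CLAIM (what is proved, stated in full; the proofs are below) =====
def Claim_equal_deduplicate_includes : Prop := ∀ (includes : List String), Dom_deduplicate_includes includes → Spec_deduplicate_includes includes (deduplicate_includes includes)

-- ===== LEMMAS AND PROOFS =====

-- the composite sort key of B, valued in the lexicographic order on Bool × String
def keyL (x : String) : Lex (Bool × String) := toLex (!PySem.Str.startswith x "#include <", x)

theorem keyL_injective : Function.Injective keyL := by
  intro a b h
  simpa [keyL, toLex, Prod.mk.injEq] using congrArg (fun p => (ofLex p).2) h

theorem keyL_lt_of_flags {a b : String}
    (ha : (!PySem.Str.startswith a "#include <") = false)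
    (hb : (!PySem.Str.startswith b "#include <") = true) : keyL a < keyL b := by
  simp only [keyL, Prod.Lex.lt_iff, ofLex_toLex]
  rw [ha, hb]
  exact Or.inl (by decide)

theorem keyL_lt_of_eq_flags {a b : String}
    (h : (!PySem.Str.startswith a "#include <") = (!PySem.Str.startswith b "#include <"))
    (hab : a < b) : keyL a < keyL b := by
  simp only [keyL, Prod.Lex.lt_iff, ofLex_toLex]
  exact Or.inr ⟨by rw [h], hab⟩

-- sorted2's 'before' test IS the strict lexicographic comparison of keyL
theorem before_eq_gen (fa fb : Bool) (a b : String) :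
    (decide (fa < fb) || (!decide (fb < fa) && decide (a < b)))
    = decide (toLex (fa, a) < toLex (fb, b)) := by
  cases fa <;> cases fb <;> simp [Prod.Lex.lt_iff]

theorem sorted2_eq_insertBy_keyL (xs : List String) :
    PySem.List.sorted2 xs (fun x => !PySem.Str.startswith x "#include <") (fun x => x) false
      = xs.foldl (fun acc x => PySem.List.insertBy (fun a b => decide (keyL a < keyL b)) x acc) [] := by
  simp only [PySem.List.sorted2, if_neg (by decide : ¬ (false = true))]
  congr 1
  funext acc x
  congr 1
  funext a b
  exact before_eq_gen _ _ a b

theorem foldl_insertBy_keyL_pairwise (xs : List String) (acc : List String)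
    (h : acc.Pairwise (fun a b => keyL a ≤ keyL b)) :
    (xs.foldl (fun acc x => PySem.List.insertBy (fun a b => decide (keyL a < keyL b)) x acc) acc).Pairwise
      (fun a b => keyL a ≤ keyL b) := by
  induction xs generalizing acc with
  | nil => exact h
  | cons x xs ih => exact ih _ (PySem.List.insertBy_pairwise_le keyL x acc h)

-- the adjacent-dedup scan on a key-nondecreasing list: result strictly key-increasing, same elements
theorem scan_invariant (l out : List String)
    (hout : out.Pairwise (fun a b => keyL a < keyL b))
    (hl : l.Pairwise (fun a b => keyL a ≤ keyL b))
    (hcross : ∀ y ∈ out, ∀ x ∈ l, keyL y ≤ keyL x) :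
    (l.foldl (fun out x => if out.isEmpty || out.getLast? != some x then out ++ [x] else out) out).Pairwise
        (fun a b => keyL a < keyL b) ∧
      ∀ z, (z ∈ l.foldl (fun out x => if out.isEmpty || out.getLast? != some x then out ++ [x] else out) out
        ↔ z ∈ out ∨ z ∈ l) := by
  induction l generalizing out with
  | nil => exact ⟨hout, fun z => by simp⟩
  | cons x l ih =>
    obtain ⟨hhead, htail⟩ := List.pairwise_cons.mp hl
    rcases out.eq_nil_or_concat with rfl | ⟨out₀, y, rfl⟩
    · simp only [List.foldl_cons, List.isEmpty_nil, Bool.true_or, if_pos, List.nil_append]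
      obtain ⟨h1, h2⟩ := ih [x] (by simp) htail (by simpa using hhead)
      exact ⟨h1, fun z => by simpa using h2 z⟩
    · simp only [List.concat_eq_append] at hout hcross ⊢
      simp only [List.foldl_cons]
      by_cases hyx : y = x
      · have hcond : ((out₀ ++ [y]).isEmpty || (out₀ ++ [y]).getLast? != some x) = false := by
          simp [hyx]
        rw [hcond, if_neg (by simp)]
        obtain ⟨h1, h2⟩ := ih (out₀ ++ [y]) hout htail
          (fun y' hy' x' hx' => hcross y' hy' x' (List.mem_cons_of_mem _ hx'))
        refine ⟨h1, fun z => (h2 z).trans ?_⟩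
        constructor
        · rintro (hz | hz) <;> simp_all
        · rintro (hz | hz)
          · exact Or.inl hz
          · rcases List.mem_cons.mp hz with rfl | hz
            · exact Or.inl (by simp [← hyx])
            · exact Or.inr hz
      · have hyk : keyL y < keyL x := by
          refine lt_of_le_of_ne (hcross y (by simp) x (List.mem_cons_self)) ?_
          intro he; exact hyx (keyL_injective he)
        have hcond : ((out₀ ++ [y]).isEmpty || (out₀ ++ [y]).getLast? != some x) = true := by
          simp [hyx]
        rw [hcond, if_pos rfl]
        obtain ⟨hp0, _, hcr⟩ := List.pairwise_append.mp hout
        have hout' : ((out₀ ++ [y]) ++ [x]).Pairwise (fun a b => keyL a < keyL b) := by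
          refine List.pairwise_append.mpr ⟨hout, by simp, ?_⟩
          intro a ha b hb
          rcases List.mem_append.mp ha with ha0 | hay
          · rw [List.mem_singleton.mp hb]
            exact lt_trans (hcr a ha0 y (by simp)) hyk
          · rw [List.mem_singleton.mp hb, List.mem_singleton.mp hay]
            exact hyk
        have hcross' : ∀ y' ∈ (out₀ ++ [y]) ++ [x], ∀ x' ∈ l, keyL y' ≤ keyL x' := by
          intro y' hy' x' hx'
          rcases List.mem_append.mp hy' with h | h
          · exact hcross y' h x' (List.mem_cons_of_mem _ hx')
          · rw [List.mem_singleton.mp h]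
            exact hhead x' hx'
        obtain ⟨h1, h2⟩ := ih ((out₀ ++ [y]) ++ [x]) hout' htail hcross'
        refine ⟨h1, fun z => (h2 z).trans ?_⟩
        constructor
        · rintro (hz | hz)
          · rcases List.mem_append.mp hz with h | h
            · exact Or.inl h
            · exact Or.inr (by simp [List.mem_singleton.mp h])
          · exact Or.inr (List.mem_cons_of_mem _ hz)
        · rintro (hz | hz)
          · exact Or.inl (List.mem_append.mpr (Or.inl hz))
          · rcases List.mem_cons.mp hz with rfl | h
            · exact Or.inl (by simp)
            · exact Or.inr h

-- ===== A-side: the fold maintains seen = set of processed prefix, lists = its two filters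
theorem dedup_fold_invariant (xs : List String) (s : PySem.Set String) :
    xs.foldl
      (fun (st : PySem.Set String × List String × List String) inc =>
        if PySem.Set.contains st.1 inc then st
        else
          let seen := PySem.Set.add st.1 inc
          if PySem.Str.startswith inc "#include <" then (seen, st.2.1 ++ [inc], st.2.2)
          else (seen, st.2.1, st.2.2 ++ [inc]))
      (s, s.filter (fun x => PySem.Str.startswith x "#include <"),
          s.filter (fun x => !PySem.Str.startswith x "#include <"))
    = (PySem.Set.update s xs,
       (PySem.Set.update s xs).filter (fun x => PySem.Str.startswith x "#include <"),
       (PySem.Set.update s xs).filter (fun x => !PySem.Str.startswith x "#include <")) := by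
  induction xs generalizing s with
  | nil => simp [PySem.Set.update]
  | cons x xs ih =>
    simp only [List.foldl_cons]
    have hstep : PySem.Set.update s (x :: xs) = PySem.Set.update (PySem.Set.add s x) xs := rfl
    by_cases hx : x ∈ s
    · have hadd : PySem.Set.add s x = s := by simp [PySem.Set.add, hx]
      simpa [hx, hstep, hadd] using ih s
    · have hadd : PySem.Set.add s x = s ++ [x] := by simp [PySem.Set.add, hx]
      by_cases hp : PySem.Str.startswith x "#include <" = true
      all_goals simp [PySem.Str.startswith_eq] at hp
      · simpa [hx, hp, hstep, hadd, List.filter_append] using ih (s ++ [x])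
      · simpa [hx, hp, hstep, hadd, List.filter_append] using ih (s ++ [x])

-- A's result rewritten: two sorted filters of the deduplicated input, system part first
theorem a_eq (includes : List String) :
    deduplicate_includes includes
      = PySem.List.sorted ((PySem.Set.ofList includes).filter (fun x => PySem.Str.startswith x "#include <")) (fun x => x) false
        ++ PySem.List.sorted ((PySem.Set.ofList includes).filter (fun x => !PySem.Str.startswith x "#include <")) (fun x => x) false := by
  simp only [deduplicate_includes]
  have h := dedup_fold_invariant includes PySem.Set.empty
  simp only [show (PySem.Set.empty : List String) = [] from rfl, List.filter_nil] at h ⊢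
  rw [h, PySem.Set.update_nil_left]

-- a sorted filter of a duplicate-free list whose predicate pins the flag is strictly keyL-increasing
theorem sorted_filter_keyL_pairwise (S : List String) (hnd : S.Nodup) (p : String → Bool) (fl : Bool)
    (hp : ∀ x, p x = true → (!PySem.Str.startswith x "#include <") = fl) :
    (PySem.List.sorted (S.filter p) (fun x => x) false).Pairwise (fun a b => keyL a < keyL b) := by
  have hle := PySem.List.sorted_pairwise (S.filter p) (fun x => x)
  have hnd' : (PySem.List.sorted (S.filter p) (fun x => x) false).Nodup :=
    (PySem.List.sorted_perm _ _ _).nodup_iff.mpr (hnd.filter _)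
  refine (hle.and hnd').imp_of_mem ?_
  intro a b ha hb hab
  have ha' := hp a (List.mem_filter.mp ((PySem.List.mem_sorted _ _ _ _).mp ha)).2
  have hb' := hp b (List.mem_filter.mp ((PySem.List.mem_sorted _ _ _ _).mp hb)).2
  exact keyL_lt_of_eq_flags (ha'.trans hb'.symm) (lt_of_le_of_ne hab.1 hab.2)

-- A's result: strictly keyL-increasing, elements = elements of the input
theorem a_side (includes : List String) :
    (deduplicate_includes includes).Pairwise (fun a b => keyL a < keyL b) ∧
      ∀ z, (z ∈ deduplicate_includes includes ↔ z ∈ includes) := by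
  rw [a_eq]
  constructor
  · refine List.pairwise_append.mpr ⟨?_, ?_, ?_⟩
    · exact sorted_filter_keyL_pairwise _ (PySem.Set.nodup_ofList includes) _ false
        (fun x hx => by rw [hx]; rfl)
    · exact sorted_filter_keyL_pairwise _ (PySem.Set.nodup_ofList includes) _ true (fun x hx => hx)
    · intro a ha b hb
      have ha' := (List.mem_filter.mp ((PySem.List.mem_sorted _ _ _ _).mp ha)).2
      have hb' := (List.mem_filter.mp ((PySem.List.mem_sorted _ _ _ _).mp hb)).2
      exact keyL_lt_of_flags (by rw [ha']; rfl) hb'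
  · intro z
    simp only [List.mem_append, PySem.List.mem_sorted, List.mem_filter, PySem.Set.mem_ofList,
      PySem.Str.startswith_eq]
    by_cases hz : PySem.Chars.startswith z.toList ['#','i','n','c','l','u','d','e',' ','<'] = true <;>
      simp [hz]

-- B's result: strictly keyL-increasing, elements = elements of the input
theorem b_side (includes : List String) :
    (deduplicate_includes_alt includes).Pairwise (fun a b => keyL a < keyL b) ∧
      ∀ z, (z ∈ deduplicate_includes_alt includes ↔ z ∈ includes) := by
  simp only [deduplicate_includes_alt]
  have hord : (PySem.List.sorted2 includes (fun x => !PySem.Str.startswith x "#include <") (fun x => x) false).Pairwise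
      (fun a b => keyL a ≤ keyL b) := by
    rw [sorted2_eq_insertBy_keyL]
    exact foldl_insertBy_keyL_pairwise includes [] List.Pairwise.nil
  obtain ⟨h1, h2⟩ := scan_invariant _ [] List.Pairwise.nil hord (by simp)
  refine ⟨h1, fun z => (h2 z).trans ?_⟩
  simp [(PySem.List.sorted2_perm includes _ _ false).mem_iff]

-- ===== VERDICT (by name: the statement is the Claim_ definition above) =====
theorem deduplicate_includes_spec : Claim_equal_deduplicate_includes := by
  intro includes _
  show _ = _
  obtain ⟨ha, hamem⟩ := a_side includes
  obtain ⟨hb, hbmem⟩ := b_side includes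
  have hnda : (deduplicate_includes includes).Nodup :=
    ha.imp (fun h => fun he => absurd (he ▸ h) (lt_irrefl _))
  have hndb : (deduplicate_includes_alt includes).Nodup :=
    hb.imp (fun h => fun he => absurd (he ▸ h) (lt_irrefl _))
  have hperm : (deduplicate_includes includes).Perm (deduplicate_includes_alt includes) :=
    (List.perm_ext_iff_of_nodup hnda hndb).mpr (fun z => (hamem z).trans (hbmem z).symm)
  exact PySem.List.eq_of_perm_of_pairwise_le_of_injective keyL keyL_injective hperm
    (ha.imp le_of_lt) (hb.imp le_of_lt)
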